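-- pv_equiv track=rewrite | github.com/david-demarco/trading-bot-audit | order_dedup.py | _contract_matches_ticker
-- ===== SOURCE A (Python) =====
-- def _contract_matches_ticker(contract_symbol: str, ticker: str) -> bool:
--     """Check if an OCC option symbol corresponds to a given ticker.
--
--     OCC format: TICKER + YYMMDD + C/P + strike*1000 (e.g., PAAS250620C00025000)
--     The ticker is the alphabetic prefix before the first digit.
--     """
--     if not contract_symbol or not ticker:
--         return False
--     # Extract the alphabetic prefix from the contract symbol
--     prefix = ""
--     for ch in contract_symbol:
--         if ch.isalpha():
--             prefix += ch
--         else: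
--             break
--     return prefix.upper() == ticker.upper()
-- ===== SOURCE B (Python) =====
-- def _contract_matches_ticker(contract_symbol: str, ticker: str) -> bool:
--     c = contract_symbol.upper()
--     t = ticker.upper()
--     n = len(t)
--     return ticker.isalpha() and c.startswith(t) and (len(c) == n or not c[n].isalpha())
-- ===== Notes on version B (the rewrite author's own statement) =====
-- stated objective: simpler
-- what changed: B never builds the alphabetic prefix string: it checks that the ticker is all-alphabetic, that the uppercased contract symbol starts with the uppercased ticker, and that the alphabetic run ends exactly there (end of string or a non-alphabetic next character), replacing A's extract-then-compare loop.
import Mathlib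
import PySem

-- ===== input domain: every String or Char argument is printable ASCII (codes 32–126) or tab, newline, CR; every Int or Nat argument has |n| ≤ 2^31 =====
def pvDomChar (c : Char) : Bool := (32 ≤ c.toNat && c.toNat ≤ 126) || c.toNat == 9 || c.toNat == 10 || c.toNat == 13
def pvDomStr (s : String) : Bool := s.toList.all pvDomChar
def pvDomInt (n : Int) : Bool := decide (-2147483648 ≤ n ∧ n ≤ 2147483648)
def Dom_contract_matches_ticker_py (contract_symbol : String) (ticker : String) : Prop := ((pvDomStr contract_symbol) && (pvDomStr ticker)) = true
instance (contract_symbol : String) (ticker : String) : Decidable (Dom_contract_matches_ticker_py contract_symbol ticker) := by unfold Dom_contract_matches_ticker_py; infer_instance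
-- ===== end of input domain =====

-- B avoids building the alphabetic prefix string: prefix-match + boundary check instead of extract-then-compare (objective: simpler).

-- ===== PORT A =====
-- the 'for ch in contract_symbol: if ch.isalpha(): prefix += ch else: break' loop, with its accumulator
def pvPrefixA (acc : List Char) : List Char → List Char
  | [] => acc
  | ch :: rest =>
    if PySem.Chars.isalpha ch then pvPrefixA (acc ++ [ch]) rest else acc

def contract_matches_ticker_py (contract_symbol : String) (ticker : String) : Bool :=
  if contract_symbol.toList.isEmpty || ticker.toList.isEmpty then false
  else
    let pfx := pvPrefixA [] contract_symbol.toList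
    PySem.Chars.upper pfx == PySem.Chars.upper ticker.toList

-- ===== PORT B =====
def contract_matches_ticker_py_alt (contract_symbol : String) (ticker : String) : Bool :=
  let c := PySem.Chars.upper contract_symbol.toList
  let t := PySem.Chars.upper ticker.toList
  let n := PySem.List.len t
  -- c[n] is reached only when startswith holds and len(c) ≠ n, so the index is in range; pyGetD is exact there
  PySem.Chars.strIsalpha ticker.toList &&
    (PySem.Chars.startswith c t &&
      (decide (PySem.List.len c = n) || !(PySem.Chars.isalpha (PySem.List.pyGetD c n ' '))))

-- ===== PRECONDITION & SPEC =====
def Spec_contract_matches_ticker_py (contract_symbol : String) (ticker : String) (out : Bool) : Prop := out = contract_matches_ticker_py_alt contract_symbol ticker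
instance (contract_symbol : String) (ticker : String) (out : Bool) : Decidable (Spec_contract_matches_ticker_py contract_symbol ticker out) := by unfold Spec_contract_matches_ticker_py; infer_instance

-- ===== CLAIM (what is proved, stated in full; the proofs are below) =====
def Claim_equal_contract_matches_ticker_py : Prop := ∀ (contract_symbol : String) (ticker : String), Dom_contract_matches_ticker_py contract_symbol ticker → Spec_contract_matches_ticker_py contract_symbol ticker (contract_matches_ticker_py contract_symbol ticker)

-- ===== LEMMAS AND PROOFS =====

theorem isalpha_upperChar (c : Char) :
    PySem.Chars.isalpha (PySem.Chars.upperChar c) = PySem.Chars.isalpha c := by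
  have hle : ∀ a b : Char, (decide (a ≤ b)) = (decide (a.toNat ≤ b.toNat)) := by
    intro a b; rfl
  have e1 : 'a'.toNat = 97 := rfl
  have e2 : 'z'.toNat = 122 := rfl
  have e3 : 'A'.toNat = 65 := rfl
  have e4 : 'Z'.toNat = 90 := rfl
  simp only [PySem.Chars.isalpha, PySem.Chars.upperChar, PySem.Chars.islower,
    PySem.Chars.isupper, hle, e1, e2, e3, e4]
  by_cases h : 97 ≤ c.toNat ∧ c.toNat ≤ 122
  · have hv : (c.toNat - 32).isValidChar := Or.inl (by omega)
    rw [if_pos (by simp [h.1, h.2])]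
    rw [show (Char.ofNat (c.toNat - 32)).toNat = c.toNat - 32 by simp [Char.toNat_ofNat, hv]]
    rw [Bool.eq_iff_iff]
    simp only [Bool.or_eq_true, Bool.and_eq_true, decide_eq_true_eq]
    omega
  · rw [if_neg (by simpa [Decidable.not_and_iff_not_or_not] using h)]

theorem pvPrefixA_eq_takeWhile (cs : List Char) : ∀ acc,
    pvPrefixA acc cs = acc ++ cs.takeWhile PySem.Chars.isalpha := by
  induction cs with
  | nil => intro acc; simp [pvPrefixA]
  | cons c cs ih =>
    intro acc
    by_cases hc : PySem.Chars.isalpha c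
    · simp [pvPrefixA, hc, List.takeWhile_cons, ih]
    · simp [pvPrefixA, hc]

-- the core equivalence, on char lists, in the exact shape of the two ports' bodies
theorem pv_main (C T : List Char) :
    ((C.takeWhile PySem.Chars.isalpha).map PySem.Chars.upperChar == T.map PySem.Chars.upperChar)
    = (T.all PySem.Chars.isalpha &&
       ((T.map PySem.Chars.upperChar).isPrefixOf (C.map PySem.Chars.upperChar) &&
        (decide ((C.map PySem.Chars.upperChar).length = (T.map PySem.Chars.upperChar).length) ||
         !(PySem.Chars.isalpha ((C.map PySem.Chars.upperChar).getD T.length ' '))))) := by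
  induction C generalizing T with
  | nil =>
    cases T with
    | nil => simp
    | cons t T' => simp
  | cons c C' ih =>
    by_cases hc : PySem.Chars.isalpha c
    · cases T with
      | nil =>
        have : PySem.Chars.isalpha (PySem.Chars.upperChar c) = true := by
          rw [isalpha_upperChar]; exact hc
        simp [hc, this]
      | cons t T' =>
        by_cases he : PySem.Chars.upperChar c = PySem.Chars.upperChar t
        · have ht : PySem.Chars.isalpha t = true := by
            rw [← isalpha_upperChar t, ← he, isalpha_upperChar]; exact hc
          have h2 := ih T'
          simp at h2 ⊢
          simp [hc, he, ht, h2]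
        · have h1 : (PySem.Chars.upperChar c == PySem.Chars.upperChar t) = false := by simp [he]
          have h2 : (PySem.Chars.upperChar t == PySem.Chars.upperChar c) = false := by simp [Ne.symm he]
          simp [hc, h1, h2, List.isPrefixOf]
    · cases T with
      | nil =>
        have : PySem.Chars.isalpha (PySem.Chars.upperChar c) = false := by
          rw [isalpha_upperChar]; exact (Bool.not_eq_true _).mp hc
        simp [hc, this]
      | cons t T' =>
        by_cases ht : PySem.Chars.isalpha t
        · have hne : PySem.Chars.upperChar t ≠ PySem.Chars.upperChar c := by
            intro h
            have := isalpha_upperChar t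
            rw [h, isalpha_upperChar] at this
            rw [ht] at this
            simp [← this] at hc
          have h2 : (PySem.Chars.upperChar t == PySem.Chars.upperChar c) = false := by simp [hne]
          simp [hc, ht, h2, List.isPrefixOf]
        · simp [hc, ht]

-- ===== VERDICT (by name: the statement is the Claim_ definition above) =====
theorem contract_matches_ticker_py_spec : Claim_equal_contract_matches_ticker_py := by
  unfold Claim_equal_contract_matches_ticker_py
  intro cs t _
  unfold Spec_contract_matches_ticker_py contract_matches_ticker_py contract_matches_ticker_py_alt
  simp only [PySem.Chars.upper, PySem.Chars.strIsalpha, PySem.Chars.startswith,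
    PySem.List.len_eq, PySem.List.pyGetD_natCast, pvPrefixA_eq_takeWhile, List.nil_append]
  cases hT : t.toList with
  | nil => simp
  | cons t0 T' =>
    cases hC : cs.toList with
    | nil =>
      have := pv_main [] (t0 :: T')
      simp at this ⊢
    | cons c0 C' =>
      have := pv_main (c0 :: C') (t0 :: T')
      simp at this ⊢
      rw [this]
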